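-- pv_equiv track=rewrite | github.com/karenli8765/6.101-autocomplete | lab.py | is_two_character_swap
-- ===== SOURCE A (Python) =====
-- def is_two_character_swap(word1, word2):
--     """"
--     checks for two character swap
--     """
--     if len(word1) != len(word2):
--         return False
--
--     diff_indices = []
--     for i in range(len(word1)):
--         if word1[i] != word2[i]:
--             diff_indices.append(i)
--
--     if len(diff_indices) != 2:
--         return False
--
--     i, j = diff_indices
--     if word1[i] == word2[j] and word1[j] == word2[i]:
--         return True
--
--     return False
-- ===== SOURCE B (Python) =====
-- def is_two_character_swap(word1, word2):
--     """checks for two character swap"""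
--     if sorted(word1) != sorted(word2):
--         return False
--     return sum(a != b for a, b in zip(word1, word2)) == 2
-- ===== Notes on version B (the rewrite author's own statement) =====
-- stated objective: simpler
-- what changed: B replaces the index loop that collects differing positions plus an explicit cross-equality check by an anagram test (sorted(word1)==sorted(word2)) combined with a zip mismatch count of exactly 2.
import Mathlib
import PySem

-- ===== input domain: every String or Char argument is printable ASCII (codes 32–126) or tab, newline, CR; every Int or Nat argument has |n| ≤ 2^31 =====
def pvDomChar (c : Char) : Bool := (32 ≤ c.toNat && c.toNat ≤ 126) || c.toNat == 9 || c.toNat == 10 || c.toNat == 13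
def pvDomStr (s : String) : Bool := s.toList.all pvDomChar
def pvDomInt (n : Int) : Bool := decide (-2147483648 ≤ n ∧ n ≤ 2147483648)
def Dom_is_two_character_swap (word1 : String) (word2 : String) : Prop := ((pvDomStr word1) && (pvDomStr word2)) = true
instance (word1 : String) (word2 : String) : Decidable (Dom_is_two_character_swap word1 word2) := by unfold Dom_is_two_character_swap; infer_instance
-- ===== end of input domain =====

-- B is a simpler reformulation: anagram test (sorted characters equal) plus a zip mismatch count of
-- exactly 2, instead of A's index loop collecting differing positions and checking cross equalities.

-- ===== PORT A =====
def is_two_character_swap (word1 : String) (word2 : String) : Bool :=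
  let cs1 := word1.toList
  let cs2 := word2.toList
  if cs1.length ≠ cs2.length then false
  else
    let diff_indices := (List.range cs1.length).foldl
      (fun acc i => if cs1.getD i ' ' ≠ cs2.getD i ' ' then acc ++ [i] else acc) []
    match diff_indices with
    | [i, j] =>
        if cs1.getD i ' ' = cs2.getD j ' ' ∧ cs1.getD j ' ' = cs2.getD i ' ' then true else false
    | _ => false

-- ===== PORT B =====
def is_two_character_swap_alt (word1 : String) (word2 : String) : Bool :=
  if PySem.List.sorted word1.toList (fun x => x) false ≠ PySem.List.sorted word2.toList (fun x => x) false then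
    false
  else
    (word1.toList.zip word2.toList).countP (fun p => decide (p.1 ≠ p.2)) == 2

-- ===== PRECONDITION & SPEC =====
def Spec_is_two_character_swap (word1 : String) (word2 : String) (out : Bool) : Prop := out = is_two_character_swap_alt word1 word2
instance (word1 : String) (word2 : String) (out : Bool) : Decidable (Spec_is_two_character_swap word1 word2 out) := by unfold Spec_is_two_character_swap; infer_instance

-- ===== CLAIM (what is proved, stated in full; the proofs are below) =====
def Claim_equal_is_two_character_swap : Prop := ∀ (word1 : String) (word2 : String), Dom_is_two_character_swap word1 word2 → Spec_is_two_character_swap word1 word2 (is_two_character_swap word1 word2)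

-- ===== LEMMAS AND PROOFS =====

-- The differing index list of A, mapped to its character pairs, is the mismatch-filtered zip.
theorem pv_zip_lemma : ∀ (a b : List Char), a.length = b.length →
    ((List.range a.length).filter (fun i => decide (a.getD i ' ' ≠ b.getD i ' '))).map
      (fun i => (a.getD i ' ', b.getD i ' '))
      = (a.zip b).filter (fun p => decide (p.1 ≠ p.2)) := by
  intro a
  induction a with
  | nil => intro b h; simp
  | cons x a ih =>
    intro b h
    cases b with
    | nil => simp at h
    | cons y b =>
      have e1 : ((fun i => ((x :: a).getD i ' ', (y :: b).getD i ' ')) ∘ Nat.succ)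
          = (fun i => (a.getD i ' ', b.getD i ' ')) := by
        funext i; simp [List.getD]
      have e2 : ((fun i => decide ((x :: a).getD i ' ' ≠ (y :: b).getD i ' ')) ∘ Nat.succ)
          = (fun i => decide (a.getD i ' ' ≠ b.getD i ' ')) := by
        funext i; simp [List.getD]
      have ihb := ih b (by simpa using h)
      show (((List.range (a.length + 1)).filter _).map _) = _
      rw [List.range_succ_eq_map]
      by_cases hxy : x = y
      · rw [List.filter_cons_of_neg (by simp [hxy]), List.filter_map, e2, List.map_map, e1, ihb]
        rw [List.zip_cons_cons, List.filter_cons_of_neg (by simp [hxy])]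
      · rw [List.filter_cons_of_pos (by simp [hxy]), List.map_cons, List.filter_map, e2,
          List.map_map, e1, ihb]
        simp only [List.getD_cons_zero]
        rw [List.zip_cons_cons, List.filter_cons_of_pos (by simp [hxy])]

-- the fst- and snd-projections of a pair list share a common multiset part outside the mismatches
theorem pv_decomp (p : List (Char × Char)) :
    ∃ E : Multiset Char,
      ((p.map Prod.fst : List Char) : Multiset Char)
        = E + (((p.filter (fun q => decide (q.1 ≠ q.2))).map Prod.fst : List Char) : Multiset Char)
      ∧ ((p.map Prod.snd : List Char) : Multiset Char)
        = E + (((p.filter (fun q => decide (q.1 ≠ q.2))).map Prod.snd : List Char) : Multiset Char) := by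
  induction p with
  | nil => exact ⟨0, by simp, by simp⟩
  | cons q p ih =>
    obtain ⟨x, y⟩ := q
    obtain ⟨E, hf, hs⟩ := ih
    simp only [ne_eq, decide_not] at hf hs
    by_cases hxy : x = y
    · subst hxy
      refine ⟨x ::ₘ E, ?_, ?_⟩
      · rw [List.filter_cons_of_neg (by simp), List.map_cons, ← Multiset.cons_coe]
        simp only [ne_eq, decide_not]
        rw [hf, Multiset.cons_add]
      · rw [List.filter_cons_of_neg (by simp), List.map_cons, ← Multiset.cons_coe]
        simp only [ne_eq, decide_not]
        rw [hs, Multiset.cons_add]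
    · refine ⟨E, ?_, ?_⟩
      · rw [List.filter_cons_of_pos (by simp [hxy]), List.map_cons, List.map_cons,
          ← Multiset.cons_coe, ← Multiset.cons_coe]
        simp only [ne_eq, decide_not]
        rw [hf, Multiset.add_cons]
      · rw [List.filter_cons_of_pos (by simp [hxy]), List.map_cons, List.map_cons,
          ← Multiset.cons_coe, ← Multiset.cons_coe]
        simp only [ne_eq, decide_not]
        rw [hs, Multiset.add_cons]

theorem pv_mult_lemma (p : List (Char × Char)) :
    ((p.map Prod.fst : List Char) : Multiset Char) = ((p.map Prod.snd : List Char) : Multiset Char)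
      ↔ (((p.filter (fun q => decide (q.1 ≠ q.2))).map Prod.fst : List Char) : Multiset Char)
          = (((p.filter (fun q => decide (q.1 ≠ q.2))).map Prod.snd : List Char) : Multiset Char) := by
  obtain ⟨E, hf, hs⟩ := pv_decomp p
  rw [hf, hs, add_right_inj]

theorem pv_pair_lemma (x1 y1 x2 y2 : Char) (h1 : x1 ≠ y1) (h2 : x2 ≠ y2) :
    (({x1, x2} : Multiset Char) = ({y1, y2} : Multiset Char)) ↔ (x1 = y2 ∧ x2 = y1) := by
  simp only [Multiset.insert_eq_cons]
  constructor
  · intro h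
    have hx1 : x1 ∈ (y1 ::ₘ ({y2} : Multiset Char)) := by rw [← h]; simp
    have hx1' : x1 = y2 := by
      rcases Multiset.mem_cons.mp hx1 with h' | h'
      · exact absurd h' h1
      · simpa using h'
    subst hx1'
    refine ⟨rfl, ?_⟩
    rw [show (y1 ::ₘ ({x1} : Multiset Char)) = x1 ::ₘ ({y1} : Multiset Char) from Multiset.cons_swap _ _ _] at h
    have := (Multiset.cons_inj_right (s := ({x2} : Multiset Char)) (t := ({y1} : Multiset Char)) x1).mp h
    simpa using this
  · rintro ⟨rfl, rfl⟩
    exact Multiset.cons_swap _ _ _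

-- the whole equivalence, on character lists
theorem pv_core (a b : List Char) :
    (if a.length ≠ b.length then false
     else
       match (List.range a.length).foldl
          (fun acc i => if a.getD i ' ' ≠ b.getD i ' ' then acc ++ [i] else acc) ([] : List Nat) with
       | [i, j] =>
           if a.getD i ' ' = b.getD j ' ' ∧ a.getD j ' ' = b.getD i ' ' then true else false
       | _ => false)
    = (if PySem.List.sorted a (fun x => x) false ≠ PySem.List.sorted b (fun x => x) false then false
       else (a.zip b).countP (fun p => decide (p.1 ≠ p.2)) == 2) := by
  by_cases hlen : a.length = b.length
  · rw [if_neg (not_not_intro hlen)]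
    have hfold : (List.range a.length).foldl
        (fun acc i => if a.getD i ' ' ≠ b.getD i ' ' then acc ++ [i] else acc) ([] : List Nat)
        = (List.range a.length).filter (fun i => decide (a.getD i ' ' ≠ b.getD i ' ')) := by
      simpa using PySem.List.foldl_append_ite_eq_filter
        (fun i => a.getD i ' ' ≠ b.getD i ' ') (List.range a.length) ([] : List Nat)
    have hz := pv_zip_lemma a b hlen
    have hcount : (a.zip b).countP (fun p => decide (p.1 ≠ p.2))
        = ((List.range a.length).filter (fun i => decide (a.getD i ' ' ≠ b.getD i ' '))).length := by
      rw [List.countP_eq_length_filter, ← hz, List.length_map]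
    rw [hfold]
    rcases hDm : (List.range a.length).filter (fun i => decide (a.getD i ' ' ≠ b.getD i ' '))
      with _ | ⟨i, _ | ⟨j, _ | ⟨k, t⟩⟩⟩
    · rw [hDm] at hcount
      have : ((a.zip b).countP (fun p => decide (p.1 ≠ p.2)) == 2) = false := by rw [hcount]; rfl
      rw [this, ite_self]
    · rw [hDm] at hcount
      have : ((a.zip b).countP (fun p => decide (p.1 ≠ p.2)) == 2) = false := by rw [hcount]; rfl
      rw [this, ite_self]
    · -- exactly two differing positions i and j
      rw [hDm] at hcount hz
      have hi : a.getD i ' ' ≠ b.getD i ' ' := by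
        have := List.of_mem_filter (p := fun i => decide (a.getD i ' ' ≠ b.getD i ' '))
          (by rw [hDm]; exact List.mem_cons_self)
        simpa using this
      have hj : a.getD j ' ' ≠ b.getD j ' ' := by
        have := List.of_mem_filter (p := fun i => decide (a.getD i ' ' ≠ b.getD i ' '))
          (by rw [hDm]; exact List.mem_cons_of_mem _ List.mem_cons_self)
        simpa using this
      have hZ : (a.zip b).filter (fun p => decide (p.1 ≠ p.2))
          = [(a.getD i ' ', b.getD i ' '), (a.getD j ' ', b.getD j ' ')] := by
        rw [← hz]; rfl
      have key : (PySem.List.sorted a (fun x => x) false = PySem.List.sorted b (fun x => x) false)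
          ↔ (a.getD i ' ' = b.getD j ' ' ∧ a.getD j ' ' = b.getD i ' ') := by
        have hm := pv_mult_lemma (a.zip b)
        rw [List.map_fst_zip (le_of_eq hlen), List.map_snd_zip (le_of_eq hlen.symm), hZ] at hm
        rw [PySem.List.sorted_id_eq_sorted_id_iff_perm, ← Multiset.coe_eq_coe, hm]
        have hpair := pv_pair_lemma (a.getD i ' ') (b.getD i ' ') (a.getD j ' ') (b.getD j ' ') hi hj
        rw [← hpair]
        constructor
        · intro h
          simpa [Multiset.insert_eq_cons, ← Multiset.cons_coe] using h
        · intro h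
          simpa [Multiset.insert_eq_cons, ← Multiset.cons_coe] using h
      have hc2 : ((a.zip b).countP (fun p => decide (p.1 ≠ p.2)) == 2) = true := by rw [hcount]; rfl
      by_cases hs : PySem.List.sorted a (fun x => x) false = PySem.List.sorted b (fun x => x) false
      · rw [if_neg (not_not_intro hs), hc2]
        show (if a.getD i ' ' = b.getD j ' ' ∧ a.getD j ' ' = b.getD i ' ' then true else false) = true
        rw [if_pos (key.mp hs)]
      · rw [if_pos hs]
        show (if a.getD i ' ' = b.getD j ' ' ∧ a.getD j ' ' = b.getD i ' ' then true else false) = false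
        rw [if_neg (fun hsw => hs (key.mpr hsw))]
    · rw [hDm] at hcount
      have : ((a.zip b).countP (fun p => decide (p.1 ≠ p.2)) == 2) = false := by
        rw [hcount]; simp [List.length_cons]
      rw [this, ite_self]
  · have hs : PySem.List.sorted a (fun x => x) false ≠ PySem.List.sorted b (fun x => x) false := by
      intro h
      exact hlen ((PySem.List.sorted_id_eq_sorted_id_iff_perm a b).mp h).length_eq
    rw [if_pos hlen, if_pos hs]

-- ===== VERDICT (by name: the statement is the Claim_ definition above) =====
theorem is_two_character_swap_spec : Claim_equal_is_two_character_swap := by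
  intro word1 word2 _
  show is_two_character_swap word1 word2 = is_two_character_swap_alt word1 word2
  exact pv_core word1.toList word2.toList
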